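-- pv_equiv track=rewrite | github.com/jose1logo/branding-scraper-automation | render_scraper.py | trim_telegram_message
-- ===== SOURCE A (Python) =====
-- def trim_telegram_message(lines):
--     message = "\n".join(lines).strip()
--     if len(message) <= 3900:
--         return message
--     trimmed = []
--     current_len = 0
--     for line in lines:
--         next_len = current_len + len(line) + 1
--         if next_len > 3800:
--             break
--         trimmed.append(line)
--         current_len = next_len
--     trimmed.append("")
--     trimmed.append("... output truncated.")
--     return "\n".join(trimmed).strip()
-- ===== SOURCE B (Python) =====
-- def trim_telegram_message(lines):
--     message = "\n".join(lines).strip()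
--     if len(message) <= 3900:
--         return message
--     # prefix sums of len(line)+1 (cost of each line plus its newline)
--     cum = []
--     total = 0
--     for line in lines:
--         total += len(line) + 1
--         cum.append(total)
--     # binary search for the first index whose cumulative length exceeds 3800
--     lo, hi = 0, len(cum)
--     while lo < hi:
--         mid = (lo + hi) // 2
--         if cum[mid] <= 3800:
--             lo = mid + 1
--         else:
--             hi = mid
--     return "\n".join(list(lines[:lo]) + ["", "... output truncated."]).strip()
-- ===== Notes on version B (the rewrite author's own statement) =====
-- stated objective: alternative
-- what changed: Replaces A's incremental accumulate-and-break loop with a prefix-sum table plus a hand-written binary search for the first cumulative length exceeding 3800, then a single slice of the kept lines.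
import Mathlib
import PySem

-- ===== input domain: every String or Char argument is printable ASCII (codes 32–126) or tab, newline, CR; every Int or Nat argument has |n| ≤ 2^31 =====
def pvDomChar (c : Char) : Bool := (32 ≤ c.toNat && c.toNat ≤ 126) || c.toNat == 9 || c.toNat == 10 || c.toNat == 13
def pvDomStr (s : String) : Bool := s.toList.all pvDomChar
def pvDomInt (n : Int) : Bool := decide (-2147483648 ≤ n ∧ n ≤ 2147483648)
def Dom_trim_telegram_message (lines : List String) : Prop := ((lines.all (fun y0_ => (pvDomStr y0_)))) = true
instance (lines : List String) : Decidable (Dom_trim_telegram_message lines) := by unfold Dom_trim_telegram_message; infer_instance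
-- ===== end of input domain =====

-- B replaces A's accumulate-and-break loop by a prefix-sum table plus a binary search (alternative decomposition, same cost).

-- ===== PORT A =====
-- the for-loop with break: state (trimmed, current_len)
def pvLoopA : List String → List String → Int → List String × Int
  | [], trimmed, cur => (trimmed, cur)
  | l :: rest, trimmed, cur =>
    let next := cur + PySem.Str.len l + 1
    if next > 3800 then (trimmed, cur)
    else pvLoopA rest (trimmed ++ [l]) next

def trim_telegram_message (lines : List String) : String :=
  let message := PySem.Str.strip (PySem.Str.join "\n" lines)
  if PySem.Str.len message ≤ 3900 then message
  else
    let trimmed := (pvLoopA lines [] 0).1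
    let trimmed := trimmed ++ [""]
    let trimmed := trimmed ++ ["... output truncated."]
    PySem.Str.strip (PySem.Str.join "\n" trimmed)

-- ===== PORT B =====
-- prefix sums of len(line)+1
def pvCum : List String → Int → List Int
  | [], _ => []
  | l :: rest, total =>
    let t := total + PySem.Str.len l + 1
    t :: pvCum rest t

-- the while-loop binary search of Source B; cum[mid] is in range whenever taken (lo < hi ≤ len), so getD is exact
def pvBsearch (cum : List Int) (lo hi : Nat) : Nat :=
  if lo < hi then
    let mid := (lo + hi) / 2
    if cum.getD mid 0 ≤ 3800 then pvBsearch cum (mid + 1) hi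
    else pvBsearch cum lo mid
  else lo
termination_by hi - lo
decreasing_by all_goals omega

def trim_telegram_message_alt (lines : List String) : String :=
  let message := PySem.Str.strip (PySem.Str.join "\n" lines)
  if PySem.Str.len message ≤ 3900 then message
  else
    let cum := pvCum lines 0
    let lo := pvBsearch cum 0 cum.length
    PySem.Str.strip (PySem.Str.join "\n" (lines.take lo ++ ["", "... output truncated."]))

-- ===== PRECONDITION & SPEC =====
def Spec_trim_telegram_message (lines : List String) (out : String) : Prop := out = trim_telegram_message_alt lines
instance (lines : List String) (out : String) : Decidable (Spec_trim_telegram_message lines out) := by unfold Spec_trim_telegram_message; infer_instance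

-- ===== CLAIM (what is proved, stated in full; the proofs are below) =====
def Claim_equal_trim_telegram_message : Prop := ∀ (lines : List String), Dom_trim_telegram_message lines → Spec_trim_telegram_message lines (trim_telegram_message lines)

-- ===== LEMMAS AND PROOFS =====

-- the number of lines A's loop keeps before breaking
def pvCnt : List String → Int → Nat
  | [], _ => 0
  | l :: rest, cur =>
    let next := cur + PySem.Str.len l + 1
    if next > 3800 then 0 else pvCnt rest next + 1

lemma pvStrLen_nonneg (s : String) : 0 ≤ PySem.Str.len s := by
  simp [PySem.Str.len_eq]

lemma pvLoopA_fst : ∀ (ls acc : List String) (cur : Int),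
    (pvLoopA ls acc cur).1 = acc ++ ls.take (pvCnt ls cur) := by
  intro ls
  induction ls with
  | nil => intro acc cur; simp [pvLoopA, pvCnt]
  | cons l rest ih =>
    intro acc cur
    simp only [pvLoopA, pvCnt]
    split_ifs with h
    · simp
    · rw [ih, List.take_succ_cons]
      simp

lemma pvCum_length : ∀ (ls : List String) (cur : Int), (pvCum ls cur).length = ls.length := by
  intro ls
  induction ls with
  | nil => intro cur; simp [pvCum]
  | cons l rest ih => intro cur; simp [pvCum, ih]

lemma pvCnt_le_length : ∀ (ls : List String) (cur : Int), pvCnt ls cur ≤ ls.length := by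
  intro ls
  induction ls with
  | nil => intro cur; simp [pvCnt]
  | cons l rest ih =>
    intro cur
    simp only [pvCnt, List.length_cons]
    split
    · omega
    · have := ih (cur + PySem.Str.len l + 1); omega

lemma pvCum_lt : ∀ (ls : List String) (cur : Int), ∀ x ∈ pvCum ls cur, cur < x := by
  intro ls
  induction ls with
  | nil => intro cur x hx; simp [pvCum] at hx
  | cons l rest ih =>
    intro cur x hx
    simp only [pvCum, List.mem_cons] at hx
    have hl := pvStrLen_nonneg l
    rcases hx with h | h
    · omega
    · have := ih (cur + PySem.Str.len l + 1) x h; omega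

lemma pvCnt_yes : ∀ (ls : List String) (cur : Int) (i : Nat),
    i < pvCnt ls cur → (pvCum ls cur).getD i 0 ≤ 3800 := by
  intro ls
  induction ls with
  | nil => intro cur i hi; simp [pvCnt] at hi
  | cons l rest ih =>
    intro cur i hi
    simp only [pvCnt] at hi
    split_ifs at hi with h
    · omega
    · cases i with
      | zero => simp only [pvCum, List.getD_cons_zero]; omega
      | succ j =>
        simp only [pvCum, List.getD_cons_succ]
        exact ih _ j (by omega)

lemma pvCnt_no : ∀ (ls : List String) (cur : Int) (i : Nat),
    pvCnt ls cur ≤ i → i < (pvCum ls cur).length → 3800 < (pvCum ls cur).getD i 0 := by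
  intro ls
  induction ls with
  | nil => intro cur i _ hlen; simp [pvCum] at hlen
  | cons l rest ih =>
    intro cur i hk hlen
    simp only [pvCnt] at hk
    simp only [pvCum, List.length_cons] at hlen
    split_ifs at hk with h
    · -- every entry is above the head, which already exceeds 3800
      cases i with
      | zero => simp only [pvCum, List.getD_cons_zero]; omega
      | succ j =>
        simp only [pvCum, List.getD_cons_succ]
        have hmem : (pvCum rest (cur + PySem.Str.len l + 1)).getD j 0
            ∈ pvCum rest (cur + PySem.Str.len l + 1) := by
          rw [List.getD_eq_getElem _ _ (by omega)]
          exact List.getElem_mem _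
        have := pvCum_lt rest (cur + PySem.Str.len l + 1) _ hmem
        omega
    · cases i with
      | zero => omega
      | succ j =>
        simp only [pvCum, List.getD_cons_succ]
        exact ih _ j (by omega) (by omega)

lemma pvBsearch_eq (cum : List Int) (k : Nat)
    (hyes : ∀ i, i < k → cum.getD i 0 ≤ 3800)
    (hno : ∀ i, k ≤ i → i < cum.length → 3800 < cum.getD i 0) :
    ∀ (n lo hi : Nat), hi - lo ≤ n → lo ≤ k → k ≤ hi → hi ≤ cum.length →
      pvBsearch cum lo hi = k := by
  intro n
  induction n with
  | zero =>
    intro lo hi h1 h2 h3 _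
    rw [pvBsearch]
    have : ¬ lo < hi := by omega
    simp [this]; omega
  | succ n ihn =>
    intro lo hi h1 h2 h3 h4
    rw [pvBsearch]
    by_cases hlh : lo < hi
    · simp only [if_pos hlh]
      set mid := (lo + hi) / 2 with hmid
      by_cases hc : cum.getD mid 0 ≤ 3800
      · simp only [if_pos hc]
        have hmk : mid < k := by
          by_contra hcon
          exact absurd (hno mid (by omega) (by omega)) (by omega)
        exact ihn (mid + 1) hi (by omega) (by omega) h3 h4
      · simp only [if_neg hc]
        have hmk : k ≤ mid := by
          by_contra hcon
          exact absurd (hyes mid (by omega)) (by omega)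
        exact ihn lo mid (by omega) h2 hmk (by omega)
    · simp [hlh]; omega

lemma pvKeep_eq (lines : List String) :
    pvBsearch (pvCum lines 0) 0 (pvCum lines 0).length = pvCnt lines 0 := by
  refine pvBsearch_eq (pvCum lines 0) (pvCnt lines 0)
    (pvCnt_yes lines 0) (pvCnt_no lines 0) (pvCum lines 0).length 0 _ (by omega)
    (Nat.zero_le _) ?_ le_rfl
  rw [pvCum_length]
  exact pvCnt_le_length lines 0

-- ===== VERDICT (by name: the statement is the Claim_ definition above) =====
theorem trim_telegram_message_spec : Claim_equal_trim_telegram_message := by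
  intro lines _
  unfold Spec_trim_telegram_message trim_telegram_message trim_telegram_message_alt
  dsimp only
  split_ifs with h
  · rfl
  · rw [pvKeep_eq, pvLoopA_fst, List.nil_append]
    simp [List.append_assoc]
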